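-- pv_equiv track=rewrite | github.com/manshri/TeluguUtilities | utils/filters.py | F
-- ===== SOURCE A (Python) =====
-- def F(A,S, ng=0):
--   F = []
--   i = j = 0
--   i_hat = 0
--   while i<len(S):
--     f = []
--     while j<len(A):
--       if S[i]==A[j]:
--         i_hat = i
--         j_hat = j
--         while i_hat<len(S) and j_hat<len(A) and S[i_hat] == A[j_hat]:
--           i_hat = i_hat + 1
--           j_hat = j_hat + 1
--         if (i_hat-i) > ng and len(f)<(i_hat - i):
--           f = [S[n] for n in range(i, i_hat)]
--         j = j_hat
--       else:
--         j = j + 1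
--     i = i + max(len(f),1)
--     j = 0
--     F.append(f)
--   return set(tuple(e) for e in F)
-- ===== SOURCE B (Python) =====
-- def F(A, S, ng=0):
--     # One backward DP pass builds, per start position i, the length of the segment
--     # the skip-scan picks (using lcp rows), then a forward pass cuts S into segments.
--     m, n = len(S), len(A)
--     best = [0] * m
--     nxt = [0] * (n + 1)          # lcp row for position i+1
--     for i in range(m - 1, -1, -1):
--         c = S[i]
--         cur = [0] * (n + 1)      # cur[j] = lcp(S[i:], A[j:])
--         for j in range(n - 1, -1, -1):
--             if c == A[j]:
--                 cur[j] = nxt[j + 1] + 1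
--         b = 0
--         j = 0
--         while j < n:             # the same skip-scan over A, on the precomputed row
--             L = cur[j]
--             if L > 0:
--                 if L > ng and L > b:
--                     b = L
--                 j += L
--             else:
--                 j += 1
--         best[i] = b
--         nxt = cur
--     out = set()
--     i = 0
--     while i < m:
--         b = best[i]
--         out.add(tuple(S[i:i + b]))
--         i += b if b else 1
--     return out
-- ===== Notes on version B (the rewrite author's own statement) =====
-- stated objective: alternative
-- what changed: B replaces A's per-position rescanning of A with character-by-character match extension by one backward DP pass that builds lcp rows (lcp[i][j] = lcp(S[i:],A[j:])) and precomputes each position's chosen segment length, then a simple forward pass cuts S; the O(L) inner extension loop disappears.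
import Mathlib
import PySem

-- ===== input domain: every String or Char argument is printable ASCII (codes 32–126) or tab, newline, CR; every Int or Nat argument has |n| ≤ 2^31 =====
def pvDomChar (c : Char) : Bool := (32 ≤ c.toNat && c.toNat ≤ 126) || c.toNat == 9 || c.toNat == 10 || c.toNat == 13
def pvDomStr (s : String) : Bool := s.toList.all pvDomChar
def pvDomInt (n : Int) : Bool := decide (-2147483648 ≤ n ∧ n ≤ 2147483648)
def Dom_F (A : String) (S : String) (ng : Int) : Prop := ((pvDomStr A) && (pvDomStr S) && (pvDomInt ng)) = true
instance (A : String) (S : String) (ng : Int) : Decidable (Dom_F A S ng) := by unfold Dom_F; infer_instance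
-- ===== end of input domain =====

-- B replaces A's per-position rescan of A with char-by-char extension by a backward
-- lcp-row DP plus a forward cutting pass; an alternative algorithm, not claimed faster.
-- (the fuel argument of each recursive function is only a totality guard: it is
--  always called with enough fuel for the Python loop, which terminates)

-- ===== PORT A =====
-- innermost while loop: returns i_hat - i, the common extension length at (i, j)
-- (indices are Nat loop counters; S[i]/A[j] are read with getD exactly where the
--  loop's own guard has them in range)
def extA (S A : List Char) : Nat → Nat → Nat → Nat
  | 0, _, _ => 0
  | fuel + 1, i, j =>
    if i < S.length ∧ j < A.length ∧ S.getD i ' ' = A.getD j ' ' then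
      extA S A fuel (i + 1) (j + 1) + 1
    else 0

-- middle while loop over j
def innerA (S A : List Char) (ng : Int) (i : Nat) : Nat → Nat → List Char → List Char
  | 0, _, f => f
  | fuel + 1, j, f =>
    if j < A.length then
      if S.getD i ' ' = A.getD j ' ' then
        innerA S A ng i fuel (j + extA S A S.length i j)
          (if ((extA S A S.length i j : Int) > ng ∧ f.length < extA S A S.length i j) then
            (S.drop i).take (extA S A S.length i j) else f)
      else innerA S A ng i fuel (j + 1) f
    else f

-- outer while loop over i, building the list F in order
def outerA (A S : List Char) (ng : Int) : Nat → Nat → List (List Char)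
  | 0, _ => []
  | fuel + 1, i =>
    if i < S.length then
      innerA S A ng i A.length 0 [] ::
        outerA A S ng fuel (i + max (innerA S A ng i A.length 0 []).length 1)
    else []

def F (A : String) (S : String) (ng : Int) : List (List String) :=
  PySem.Set.ofList
    ((outerA A.toList S.toList ng S.toList.length 0).map (fun f => f.map (fun c => String.ofList [c])))

-- ===== PORT B =====
-- one lcp row: cur[j] = nxt[j+1]+1 where c == A[j], else 0; cur[n] = 0
def rowB (c : Char) (A : List Char) (nxt : List Nat) : List Nat :=
  (List.range A.length).map
    (fun j => if c = A.getD j ' ' then nxt.getD (j + 1) 0 + 1 else 0) ++ [0]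

-- the skip-scan over a precomputed row (B's while loop over j)
def scanB (cur : List Nat) (n : Nat) (ng : Int) : Nat → Nat → Nat → Nat
  | 0, _, b => b
  | fuel + 1, j, b =>
    if j < n then
      if 0 < cur.getD j 0 then
        scanB cur n ng fuel (j + cur.getD j 0)
          (if ((cur.getD j 0 : Int) > ng ∧ b < cur.getD j 0) then cur.getD j 0 else b)
      else scanB cur n ng fuel (j + 1) b
    else b

-- backward pass over S: returns (best lengths for each position of the suffix, lcp row of the suffix)
def bestRows (A : List Char) (ng : Int) : List Char → List Nat × List Nat
  | [] => ([], List.replicate (A.length + 1) 0)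
  | c :: rest =>
    let p := bestRows A ng rest
    (scanB (rowB c A p.2) A.length ng A.length 0 0 :: p.1, rowB c A p.2)

-- forward pass: cut S into the precomputed segments
def buildB (S : List Char) (best : List Nat) : Nat → Nat → List (List Char)
  | 0, _ => []
  | fuel + 1, i =>
    if i < S.length then
      (S.drop i).take (best.getD i 0) :: buildB S best fuel (i + max (best.getD i 0) 1)
    else []

def F_alt (A : String) (S : String) (ng : Int) : List (List String) :=
  PySem.Set.ofList
    ((buildB S.toList (bestRows A.toList ng S.toList).1 S.toList.length 0).map
      (fun f => f.map (fun c => String.ofList [c])))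

-- ===== PRECONDITION & SPEC =====
def Spec_F (A : String) (S : String) (ng : Int) (out : List (List String)) : Prop := out = F_alt A S ng
instance (A : String) (S : String) (ng : Int) (out : List (List String)) : Decidable (Spec_F A S ng out) := by unfold Spec_F; infer_instance

-- ===== CLAIM (what is proved, stated in full; the proofs are below) =====
def Claim_equal_F : Prop := ∀ (A : String) (S : String) (ng : Int), Dom_F A S ng → Spec_F A S ng (F A S ng)

-- ===== LEMMAS AND PROOFS =====

-- structural longest-common-prefix, the common spec of extA and the rows of bestRows
def lcp : List Char → List Char → Nat
  | c :: s, d :: a => if c = d then lcp s a + 1 else 0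
  | _, _ => 0

theorem getD_of_lt {α : Type} [Inhabited α] (l : List α) (i : Nat) (d : α) (h : i < l.length) :
    l.getD i d = l[i] := by
  simp [List.getD_eq_getElem?_getD, List.getElem?_eq_getElem h]

theorem lcp_le (s a : List Char) : lcp s a ≤ s.length := by
  induction s generalizing a with
  | nil => cases a <;> simp [lcp]
  | cons c s ih =>
    cases a with
    | nil => simp [lcp]
    | cons d a =>
      simp only [lcp]
      split
      · have := ih a; simp only [List.length_cons]; omega
      · simp

theorem extA_eq_lcp (S A : List Char) (fuel i j : Nat) (hf : S.length - i ≤ fuel) :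
    extA S A fuel i j = lcp (S.drop i) (A.drop j) := by
  induction fuel generalizing i j with
  | zero =>
    rw [List.drop_eq_nil_of_le (by omega : S.length ≤ i)]
    rfl
  | succ fuel ih =>
    rw [extA]
    split
    · rename_i h
      obtain ⟨hi, hj, he⟩ := h
      rw [List.drop_eq_getElem_cons hi, List.drop_eq_getElem_cons hj, lcp]
      rw [getD_of_lt S i ' ' hi, getD_of_lt A j ' ' hj] at he
      rw [ih (i + 1) (j + 1) (by omega)]
      simp [he]
    · rename_i h
      by_cases hi : i < S.length
      · by_cases hj : j < A.length
        · rw [List.drop_eq_getElem_cons hi, List.drop_eq_getElem_cons hj, lcp]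
          have he : ¬ S[i] = A[j] := by
            intro he
            exact h ⟨hi, hj, by rw [getD_of_lt S i ' ' hi, getD_of_lt A j ' ' hj]; exact he⟩
          simp [he]
        · rw [List.drop_eq_nil_of_le (by omega : A.length ≤ j)]
          rw [List.drop_eq_getElem_cons hi]; rfl
      · rw [List.drop_eq_nil_of_le (by omega : S.length ≤ i)]; rfl

-- extA with its actual fuel S.length
theorem extAe_eq (S A : List Char) (i j : Nat) :
    extA S A S.length i j = lcp (S.drop i) (A.drop j) :=
  extA_eq_lcp S A S.length i j (by omega)

theorem extAe_pos (S A : List Char) (i j : Nat)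
    (hi : i < S.length) (hj : j < A.length) (he : S.getD i ' ' = A.getD j ' ') :
    0 < extA S A S.length i j := by
  rw [extAe_eq, List.drop_eq_getElem_cons hi, List.drop_eq_getElem_cons hj, lcp]
  rw [getD_of_lt S i ' ' hi, getD_of_lt A j ' ' hj] at he
  simp [he]

theorem extAe_eq_zero (S A : List Char) (i j : Nat)
    (hi : i < S.length) (hj : j < A.length) (he : ¬ S.getD i ' ' = A.getD j ' ') :
    extA S A S.length i j = 0 := by
  rw [extAe_eq, List.drop_eq_getElem_cons hi, List.drop_eq_getElem_cons hj, lcp]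
  rw [getD_of_lt S i ' ' hi, getD_of_lt A j ' ' hj] at he
  simp [he]

theorem extAe_le (S A : List Char) (i j : Nat) : extA S A S.length i j ≤ S.length - i := by
  rw [extAe_eq]
  have := lcp_le (S.drop i) (A.drop j)
  simpa using this

theorem rowB_getD (c : Char) (A : List Char) (nxt : List Nat) (j : Nat) :
    (rowB c A nxt).getD j 0 =
      if j < A.length then (if c = A.getD j ' ' then nxt.getD (j + 1) 0 + 1 else 0) else 0 := by
  unfold rowB
  by_cases hj : j < A.length
  · rw [List.getD_eq_getElem?_getD, List.getElem?_append_left (by simpa using hj)]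
    simp [hj]
  · rw [List.getD_eq_getElem?_getD, List.getElem?_append_right (by simpa using Nat.le_of_not_lt hj)]
    simp only [List.length_map, List.length_range]
    by_cases hj1 : j = A.length
    · simp [hj1, if_neg hj]
    · have h2 : ([0] : List Nat)[j - A.length]? = none := by
        rw [List.getElem?_eq_none_iff]
        simp only [List.length_cons, List.length_nil]
        omega
      simp [h2, if_neg hj]

theorem bestRows_snd (A : List Char) (ng : Int) (T : List Char) (j : Nat) :
    (bestRows A ng T).2.getD j 0 = lcp T (A.drop j) := by
  induction T generalizing j with
  | nil =>
    simp only [bestRows]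
    rw [List.getD_eq_getElem?_getD]
    rcases lt_or_ge j (A.length + 1) with h | h
    · simp [List.getElem?_replicate, h, lcp]
    · have h2 : (List.replicate (A.length + 1) (0 : Nat))[j]? = none := by
        rw [List.getElem?_eq_none_iff]; simpa using h
      simp [h2, lcp]
  | cons c rest ih =>
    simp only [bestRows, rowB_getD]
    by_cases hj : j < A.length
    · rw [List.drop_eq_getElem_cons hj, lcp]
      have : A.getD j ' ' = A[j] := getD_of_lt A j ' ' hj
      rw [this, ih (j + 1)]
      simp [hj]
    · rw [List.drop_eq_nil_of_le (by omega : A.length ≤ j)]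
      simp [hj, lcp]

theorem scanB_le (cur : List Nat) (n : Nat) (ng : Int) (K : Nat)
    (hc : ∀ j', cur.getD j' 0 ≤ K) :
    ∀ fuel j b, b ≤ K → scanB cur n ng fuel j b ≤ K := by
  intro fuel
  induction fuel with
  | zero => intro j b hb; exact hb
  | succ fuel ih =>
    intro j b hb
    rw [scanB]
    by_cases hj : j < n
    · rw [if_pos hj]
      by_cases hL : 0 < cur.getD j 0
      · rw [if_pos hL]
        refine ih _ _ ?_
        split
        · exact hc j
        · exact hb
      · rw [if_neg hL]
        exact ih _ _ hb
    · simpa [hj] using hb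

theorem inner_scan (S A : List Char) (ng : Int) (i : Nat) (hi : i < S.length)
    (cur : List Nat) (hcur : ∀ j, cur.getD j 0 = extA S A S.length i j) :
    ∀ fuel j b, b ≤ S.length - i →
      innerA S A ng i fuel j ((S.drop i).take b) =
        (S.drop i).take (scanB cur A.length ng fuel j b) := by
  intro fuel
  induction fuel with
  | zero => intro j b _; rfl
  | succ fuel ih =>
    intro j b hb
    rw [innerA, scanB]
    by_cases hj : j < A.length
    · rw [if_pos hj, if_pos hj]
      by_cases hm : S.getD i ' ' = A.getD j ' '
      · have hL : 0 < cur.getD j 0 := by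
          rw [hcur]; exact extAe_pos S A i j hi hj hm
        have hLe : extA S A S.length i j ≤ S.length - i := extAe_le S A i j
        have hflen : ((S.drop i).take b).length = b := by
          simp [List.length_take, List.length_drop]; omega
        rw [if_pos hm, if_pos hL, hcur]
        by_cases hc2 : (extA S A S.length i j : Int) > ng ∧ b < extA S A S.length i j
        · rw [if_pos (by rw [hflen]; exact hc2), if_pos hc2]
          exact ih (j + extA S A S.length i j) (extA S A S.length i j) hLe
        · rw [if_neg (by rw [hflen]; exact hc2), if_neg hc2]
          exact ih (j + extA S A S.length i j) b hb
      · have hL : ¬ 0 < cur.getD j 0 := by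
          rw [hcur, extAe_eq_zero S A i j hi hj hm]
          omega
        rw [if_neg hm, if_neg hL]
        exact ih (j + 1) b hb
    · simp [hj]

theorem bestRows_fst (A : List Char) (ng : Int) (T : List Char) :
    ∀ i, i < T.length →
      (bestRows A ng T).1.getD i 0 =
        scanB (bestRows A ng (T.drop i)).2 A.length ng A.length 0 0 := by
  intro i
  induction T generalizing i with
  | nil => intro h; simp at h
  | cons c rest ih =>
    intro h
    cases i with
    | zero => simp [bestRows]
    | succ i =>
      simp only [bestRows, List.drop_succ_cons]
      rw [List.getD_cons_succ]
      exact ih i (by simpa using h)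

theorem outer_build (A S : List Char) (ng : Int) :
    ∀ fuel i, outerA A S ng fuel i = buildB S (bestRows A ng S).1 fuel i := by
  intro fuel
  induction fuel with
  | zero => intro i; rfl
  | succ fuel ih =>
    intro i
    rw [outerA, buildB]
    by_cases hi : i < S.length
    · rw [if_pos hi, if_pos hi]
      set b := (bestRows A ng S).1.getD i 0 with hbdef
      have hcur : ∀ j, (bestRows A ng (S.drop i)).2.getD j 0 = extA S A S.length i j := by
        intro j
        rw [bestRows_snd, extAe_eq]
      have hb : b = scanB (bestRows A ng (S.drop i)).2 A.length ng A.length 0 0 :=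
        bestRows_fst A ng S i hi
      have hble : b ≤ S.length - i := by
        rw [hb]
        refine scanB_le _ _ _ _ ?_ A.length 0 0 (by omega)
        intro j'
        rw [hcur j']
        exact extAe_le S A i j'
      have hf : innerA S A ng i A.length 0 [] = (S.drop i).take b := by
        have h0 : ((S.drop i).take 0) = ([] : List Char) := by simp
        rw [← h0, inner_scan S A ng i hi _ hcur A.length 0 0 (by omega), ← hb]
      have hflen : ((S.drop i).take b).length = b := by
        simp [List.length_take, List.length_drop]; omega
      rw [hf, hflen]
      congr 1
      exact ih _
    · rw [if_neg hi, if_neg hi]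

-- ===== VERDICT (by name: the statement is the Claim_ definition above) =====
theorem F_spec : Claim_equal_F := by
  intro A S ng _
  unfold Spec_F F F_alt
  rw [outer_build A.toList S.toList ng S.toList.length 0]
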